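-- pv_equiv track=rewrite | github.com/v2129375/d13944013_hw3_jpeg_decoder | jpeg_decoder.py | _combine_coefficients
-- ===== SOURCE A (Python) =====
-- def _combine_coefficients(dc_value, ac_values):
--     """将DC和AC系数组合成8x8块"""
--     # 创建8x8的系数块
--     block = [[0] * 8 for _ in range(8)]
--
--     # 标准JPEG zigzag顺序
--     zigzag_order = [
--         0,  1,  5,  6, 14, 15, 27, 28,
--         2,  4,  7, 13, 16, 26, 29, 42,
--         3,  8, 12, 17, 25, 30, 41, 43,
--         9, 11, 18, 24, 31, 40, 44, 53,
--         10, 19, 23, 32, 39, 45, 52, 54,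
--         20, 22, 33, 38, 46, 51, 55, 60,
--         21, 34, 37, 47, 50, 56, 59, 61,
--         35, 36, 48, 49, 57, 58, 62, 63
--     ]
--
--     # 放置DC系数
--     block[0][0] = dc_value
--
--     # 按zigzag顺序放置AC系数
--     for i, ac_value in enumerate(ac_values):
--         pos = zigzag_order[i + 1]  # +1是因为跳过DC位置
--         row = pos // 8
--         col = pos % 8
--         block[row][col] = ac_value
--
--     return block
-- ===== SOURCE B (Python) =====
-- def _coeff_slot(s):
--     """The unique index j (0 = DC slot) whose coefficient lands in raster cell
--     number s, i.e. the j with zigzag_order[j] == s: walk the anti-diagonals of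
--     the zigzag scan to locate step s, giving the cell (r, d-r) the walk visits
--     then, and read j back as that cell's raster number."""
--     d, base = 0, 0
--     while base + (d + 1 if d < 8 else 15 - d) <= s:
--         base += d + 1 if d < 8 else 15 - d
--         d += 1
--     off = s - base
--     lo = d - 7 if d > 7 else 0
--     hi = 7 if d > 7 else d
--     r = lo + off if d % 2 else hi - off
--     return r * 8 + (d - r)
--
--
-- def _combine_coefficients(dc_value, ac_values):
--     """Gather version: compute, for each of the 64 cells, which coefficient
--     belongs there, instead of scattering coefficients through a lookup table."""
--     n = len(ac_values)
--
--     def cell(s):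
--         j = _coeff_slot(s)
--         if j == 0:
--             return dc_value
--         return ac_values[j - 1] if j - 1 < n else 0
--
--     return [[cell(r * 8 + c) for c in range(8)] for r in range(8)]
-- ===== Notes on version B (the rewrite author's own statement) =====
-- stated objective: alternative
-- what changed: B is a gather, not a scatter: instead of looping over ac_values and writing each into the block through a 64-entry zigzag table, it builds the block cell by cell, computing for each of the 64 cells which coefficient index lands there by locating the cell's scan step on the zigzag anti-diagonals, and reading dc/ac_values (or 0) at that index.
import Mathlib
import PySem

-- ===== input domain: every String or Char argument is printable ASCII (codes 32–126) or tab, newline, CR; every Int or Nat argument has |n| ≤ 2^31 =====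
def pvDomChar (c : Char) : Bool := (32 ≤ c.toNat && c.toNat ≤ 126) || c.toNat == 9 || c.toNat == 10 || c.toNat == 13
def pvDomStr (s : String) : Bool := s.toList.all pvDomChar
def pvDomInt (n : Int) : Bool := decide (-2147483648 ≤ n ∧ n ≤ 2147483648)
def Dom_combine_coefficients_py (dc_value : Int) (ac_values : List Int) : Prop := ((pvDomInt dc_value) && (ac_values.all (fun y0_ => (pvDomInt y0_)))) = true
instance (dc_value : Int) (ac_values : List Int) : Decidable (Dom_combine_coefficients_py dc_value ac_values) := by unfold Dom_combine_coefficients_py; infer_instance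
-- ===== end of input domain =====

-- B gathers: each of the 64 cells computes which coefficient index lands there (locating its scan step on the zigzag anti-diagonals), instead of A's scatter through a hardcoded 64-entry table (alternative algorithm, same cost).


-- ===== PORT A =====
def pvZigzagA : List Int := [
  0,  1,  5,  6, 14, 15, 27, 28,
  2,  4,  7, 13, 16, 26, 29, 42,
  3,  8, 12, 17, 25, 30, 41, 43,
  9, 11, 18, 24, 31, 40, 44, 53,
  10, 19, 23, 32, 39, 45, 52, 54,
  20, 22, 33, 38, 46, 51, 55, 60,
  21, 34, 37, 47, 50, 56, 59, 61,
  35, 36, 48, 49, 57, 58, 62, 63]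

def combine_coefficients_py (dc_value : Int) (ac_values : List Int) : List (List Int) :=
  let block : List (List Int) := List.replicate 8 (List.replicate 8 0)
  -- block[0][0] = dc_value
  let block := PySem.List.pySetD block 0 (PySem.List.pySetD (PySem.List.pyGetD block 0 []) 0 dc_value)
  -- for i, ac_value in enumerate(ac_values): …   (zigzag_order[i + 1] is in range under Pre_)
  (PySem.List.enumerate ac_values).foldl (fun b iv =>
    let pos := PySem.List.pyGetD pvZigzagA (iv.1 + 1) 0
    let row := PySem.Int.floordiv pos 8
    let col := PySem.Int.mod pos 8
    PySem.List.pySetD b row (PySem.List.pySetD (PySem.List.pyGetD b row []) col iv.2)) block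

-- ===== PORT B =====
-- the while loop of _coeff_slot; fuel 15 = number of anti-diagonals, which the loop
-- never exceeds for the arguments 0 ≤ s < 64 the caller passes (exact there)
def pvSlotLoop (s : Int) : Nat → Int → Int → Int × Int
  | 0, d, base => (d, base)
  | k+1, d, base =>
      let len := if d < 8 then d + 1 else 15 - d
      if base + len ≤ s then pvSlotLoop s k (d + 1) (base + len) else (d, base)

-- _coeff_slot(s): the unique j with zigzag_order[j] == s, found by walking the anti-diagonals
def pvCoeffSlot (s : Int) : Int :=
  let db := pvSlotLoop s 15 0 0
  let d := db.1
  let off := s - db.2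
  let lo := if d > 7 then d - 7 else 0
  let hi := if d > 7 then (7 : Int) else d
  let r := if PySem.Int.mod d 2 == 0 then hi - off else lo + off
  r * 8 + (d - r)

-- the nested helper cell(s) of B (n = len(ac_values))
def pvCell (dc_value : Int) (n : Int) (ac_values : List Int) (s : Int) : Int :=
  if pvCoeffSlot s == 0 then dc_value
  else if pvCoeffSlot s - 1 < n then PySem.List.pyGetD ac_values (pvCoeffSlot s - 1) 0 else 0

def combine_coefficients_py_alt (dc_value : Int) (ac_values : List Int) : List (List Int) :=
  let n : Int := ac_values.length
  (PySem.List.pyRange 0 8 1).map (fun r =>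
    (PySem.List.pyRange 0 8 1).map (fun c =>
      pvCell dc_value n ac_values (r * 8 + c)))

-- ===== PRECONDITION & SPEC =====
-- Pre_ excludes only inputs with more than 63 AC values, on which A raises IndexError.
def Pre_combine_coefficients_py (dc_value : Int) (ac_values : List Int) : Prop :=
  ac_values.length ≤ 63
instance (dc_value : Int) (ac_values : List Int) : Decidable (Pre_combine_coefficients_py dc_value ac_values) := by unfold Pre_combine_coefficients_py; infer_instance

def pvWitness_combine_coefficients_py : Int × List Int := (5, [1, 2, 3])

def Spec_combine_coefficients_py (dc_value : Int) (ac_values : List Int) (out : List (List Int)) : Prop := out = combine_coefficients_py_alt dc_value ac_values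
instance (dc_value : Int) (ac_values : List Int) (out : List (List Int)) : Decidable (Spec_combine_coefficients_py dc_value ac_values out) := by unfold Spec_combine_coefficients_py; infer_instance

-- ===== CLAIM (what is proved, stated in full; the proofs are below) =====
def Claim_equal_combine_coefficients_py : Prop := ∀ (dc_value : Int) (ac_values : List Int), Dom_combine_coefficients_py dc_value ac_values → Pre_combine_coefficients_py dc_value ac_values → Spec_combine_coefficients_py dc_value ac_values (combine_coefficients_py dc_value ac_values)

-- ===== LEMMAS AND PROOFS =====

-- one scatter write of A, as a function
def pvWrite (b : List (List Int)) (pos v : Int) : List (List Int) :=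
  PySem.List.pySetD b (PySem.Int.floordiv pos 8)
    (PySem.List.pySetD (PySem.List.pyGetD b (PySem.Int.floordiv pos 8) []) (PySem.Int.mod pos 8) v)

-- pvCoeffSlot inverts the table: slot(table[j]) = j, and the table's values lie in [0,64)
set_option maxRecDepth 10000 in
theorem pv_slot_table : ∀ j : Nat, j < 64 →
    pvCoeffSlot (pvZigzagA.getD j 0) = (j : Int) ∧
    0 ≤ pvZigzagA.getD j 0 ∧ pvZigzagA.getD j 0 < 64 := by decide

-- and the other direction: table[slot(s)] = s with 0 ≤ slot(s) < 64
set_option maxRecDepth 10000 in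
theorem pv_table_slot : ∀ s : Nat, s < 64 →
    0 ≤ pvCoeffSlot (s : Int) ∧ pvCoeffSlot (s : Int) < 64 ∧
    pvZigzagA.getD (pvCoeffSlot (s : Int)).toNat 0 = (s : Int) := by decide

theorem pvWrite_natCast (b : List (List Int)) (p : Nat) (v : Int) :
    pvWrite b (p : Int) v = b.set (p / 8) ((b.getD (p / 8) []).set (p % 8) v) := by
  unfold pvWrite
  rw [show (8 : Int) = ((8 : Nat) : Int) from rfl, PySem.Int.floordiv_natCast, PySem.Int.mod_natCast]
  simp only [PySem.List.pySetD_natCast, PySem.List.pyGetD_natCast]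

-- A appends one coefficient = one more write on A's result
theorem pv_A_step (dc x : Int) (ac : List Int) :
    combine_coefficients_py dc (ac ++ [x]) =
      pvWrite (combine_coefficients_py dc ac)
        (PySem.List.pyGetD pvZigzagA ((ac.length : Int) + 1) 0) x := by
  unfold combine_coefficients_py
  rw [PySem.List.enumerate_append, List.foldl_append]
  simp [PySem.List.enumerate, pvWrite]

-- the alt block written as nested maps over Nat ranges
def pvGather (dc : Int) (n : Int) (ac : List Int) : List (List Int) :=
  (List.range 8).map (fun (r : Nat) =>
    (List.range 8).map (fun (c : Nat) => pvCell dc n ac ((r * 8 + c : Nat) : Int)))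

theorem pvGather_length (dc n : Int) (ac : List Int) : (pvGather dc n ac).length = 8 := by
  simp [pvGather]

theorem pvGather_getElem (dc n : Int) (ac : List Int) (r : Nat)
    (h : r < (pvGather dc n ac).length) :
    (pvGather dc n ac)[r] =
      (List.range 8).map (fun (c : Nat) => pvCell dc n ac ((r * 8 + c : Nat) : Int)) := by
  unfold pvGather at h ⊢
  rw [List.getElem_map, List.getElem_range]

theorem pv_alt_eq (dc : Int) (ac : List Int) :
    combine_coefficients_py_alt dc ac = pvGather dc (ac.length : Int) ac := by
  unfold combine_coefficients_py_alt pvGather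
  rw [PySem.List.pyRange_one]
  simp only [show ((8 : Int) - 0).toNat = 8 from rfl, List.map_map, Function.comp_def, zero_add]
  refine List.map_congr_left fun r _ => List.map_congr_left fun c _ => ?_
  norm_cast

-- pointwise effect on B's cells of appending one coefficient
theorem pv_cell_step (dc x : Int) (ac : List Int) (hn : ac.length ≤ 62)
    (s : Nat) (hs : s < 64) (pN : Nat)
    (hpN : pvZigzagA.getD (ac.length + 1) 0 = (pN : Int)) :
    pvCell dc ((ac.length : Int) + 1) (ac ++ [x]) (s : Int) =
      (if s = pN then x else pvCell dc (ac.length : Int) ac (s : Int)) := by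
  obtain ⟨hslotp, hp0, hp64⟩ := pv_slot_table (ac.length + 1) (by omega)
  obtain ⟨hj0, hj64, htab⟩ := pv_table_slot s hs
  unfold pvCell
  by_cases hsp : s = pN
  · rw [if_pos hsp]
    have hcoe : (s : Int) = pvZigzagA.getD (ac.length + 1) 0 := by
      rw [hpN, hsp]
    have hjv : pvCoeffSlot (s : Int) = (ac.length : Int) + 1 := by
      rw [hcoe, hslotp]; push_cast; ring
    rw [hjv]
    rw [if_neg (by simp; omega : ¬ ((((ac.length : Int) + 1) == 0) = true))]
    rw [if_pos (by omega : (ac.length : Int) + 1 - 1 < (ac.length : Int) + 1)]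
    rw [show (ac.length : Int) + 1 - 1 = ((ac.length : Nat) : Int) by ring,
      PySem.List.pyGetD_natCast]
    simp [List.getD]
  · rw [if_neg hsp]
    have hjne : pvCoeffSlot (s : Int) ≠ (ac.length : Int) + 1 := by
      intro h
      apply hsp
      rw [h] at htab
      rw [show ((ac.length : Int) + 1).toNat = ac.length + 1 by omega, hpN] at htab
      omega
    by_cases hz : (pvCoeffSlot (s : Int) == 0) = true
    · rw [if_pos hz, if_pos hz]
    · rw [if_neg hz, if_neg hz]
      have hj1 : 1 ≤ pvCoeffSlot (s : Int) := by
        have : pvCoeffSlot (s : Int) ≠ 0 := by simpa using hz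
        omega
      by_cases hlt : pvCoeffSlot (s : Int) - 1 < (ac.length : Int)
      · rw [if_pos (by omega : pvCoeffSlot (s : Int) - 1 < (ac.length : Int) + 1), if_pos hlt]
        obtain ⟨k, hk⟩ : ∃ k : Nat, pvCoeffSlot (s : Int) - 1 = (k : Int) :=
          ⟨_, (Int.toNat_of_nonneg (by omega)).symm⟩
        have hkn : k < ac.length := by omega
        rw [hk, PySem.List.pyGetD_natCast, PySem.List.pyGetD_natCast,
          List.getD_eq_getElem _ _ (by simp; omega), List.getD_eq_getElem _ _ hkn]
        simp [List.getElem_append_left hkn]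
      · rw [if_neg (by omega : ¬ (pvCoeffSlot (s : Int) - 1 < (ac.length : Int) + 1)), if_neg hlt]

-- B appends one coefficient = the same write on B's result
theorem pv_B_step (dc x : Int) (ac : List Int) (hn : ac.length ≤ 62) :
    combine_coefficients_py_alt dc (ac ++ [x]) =
      pvWrite (combine_coefficients_py_alt dc ac)
        (PySem.List.pyGetD pvZigzagA ((ac.length : Int) + 1) 0) x := by
  obtain ⟨hslotp, hp0, hp64⟩ := pv_slot_table (ac.length + 1) (by omega)
  obtain ⟨pN, hpN⟩ : ∃ pN : Nat, pvZigzagA.getD (ac.length + 1) 0 = (pN : Int) :=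
    ⟨_, (Int.toNat_of_nonneg hp0).symm⟩
  have hpn64 : pN < 64 := by omega
  have hcast : PySem.List.pyGetD pvZigzagA ((ac.length : Int) + 1) 0 = (pN : Int) := by
    rw [show (ac.length : Int) + 1 = ((ac.length + 1 : Nat) : Int) by push_cast; ring,
      PySem.List.pyGetD_natCast, hpN]
  rw [hcast, pvWrite_natCast, pv_alt_eq, pv_alt_eq]
  have hnc : (((ac ++ [x]).length : Nat) : Int) = (ac.length : Int) + 1 := by simp
  have hrow : (pvGather dc (ac.length : Int) ac).getD (pN / 8) [] =
      (List.range 8).map (fun (c : Nat) => pvCell dc (ac.length : Int) ac (((pN / 8) * 8 + c : Nat) : Int)) := by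
    rw [List.getD_eq_getElem _ _ (by rw [pvGather_length]; omega), pvGather_getElem]
  apply List.ext_getElem
  · simp [pvGather]
  intro r hr1 hr2
  have hr : r < 8 := by rw [pvGather_length] at hr1; exact hr1
  rw [pvGather_getElem, List.getElem_set]
  by_cases hcase : pN / 8 = r
  · rw [if_pos hcase, hrow]
    subst hcase
    apply List.ext_getElem
    · simp
    intro c hc1 hc2
    have hc : c < 8 := by simpa using hc1
    rw [List.getElem_map, List.getElem_set, List.getElem_map]
    simp only [List.getElem_range]
    rw [hnc, pv_cell_step dc x ac hn _ (by omega) pN hpN]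
    by_cases hcol : pN % 8 = c
    · rw [if_pos hcol, if_pos (by omega)]
    · rw [if_neg hcol, if_neg (by omega)]
  · rw [if_neg hcase, pvGather_getElem]
    apply List.ext_getElem
    · simp
    intro c hc1 hc2
    have hc : c < 8 := by simpa using hc1
    rw [List.getElem_map, List.getElem_map]
    simp only [List.getElem_range]
    rw [hnc, pv_cell_step dc x ac hn _ (by omega) pN hpN]
    rw [if_neg (by omega)]

-- the main equivalence, by induction on ac_values from the right
theorem pv_combine_eq (dc : Int) (ac : List Int) :
    ac.length ≤ 63 → combine_coefficients_py dc ac = combine_coefficients_py_alt dc ac := by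
  induction ac using List.reverseRecOn with
  | nil => intro _; rfl
  | append_singleton ac x ih =>
    intro h
    have hn : ac.length ≤ 62 := by simp at h; omega
    rw [pv_A_step, pv_B_step dc x ac hn, ih (by omega)]

-- ===== VERDICT (by name: the statement is the Claim_ definition above) =====
theorem combine_coefficients_py_spec : Claim_equal_combine_coefficients_py := by
  intro dc ac _ hpre
  unfold Spec_combine_coefficients_py
  exact pv_combine_eq dc ac hpre
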